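-- pv_equiv track=rewrite | github.com/Savin97/scratch_project | test3.py | is_rolling_list
-- ===== SOURCE A (Python) =====
-- def is_rolling_list(l1, index=0):
--     # If list has less than 2 elements → False
--     if len(l1) < 2:
--         return False
--
--     # If reached last comparison → True
--     if index == len(l1) - 1:
--         return True
--     # Find leftmost digit of next number recursively (inline logic)
--     num = l1[index + 1]
--     while num >= 10:
--         num //= 10
--     # Check rolling condition
--     if l1[index] % 10 != num:
--         return False
--
--     # Recursive step
--     return is_rolling_list(l1, index + 1)
-- ===== SOURCE B (Python) =====
-- def is_rolling_list(l1, index=0):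
--     if len(l1) < 2:
--         return False
--     return all(l1[i] % 10 == _lead(l1[i + 1]) for i in range(index, len(l1) - 1))
--
--
-- def _lead(num):
--     while num >= 10:
--         num //= 10
--     return num
-- ===== Notes on version B (the rewrite author's own statement) =====
-- stated objective: simpler
-- what changed: Replaced A's self-recursion over the index (which re-checks the length guard on every call) with one guard plus a single all(...) over range(index, len(l1)-1) comparing each element's last digit with the next element's leading digit.
import Mathlib
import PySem

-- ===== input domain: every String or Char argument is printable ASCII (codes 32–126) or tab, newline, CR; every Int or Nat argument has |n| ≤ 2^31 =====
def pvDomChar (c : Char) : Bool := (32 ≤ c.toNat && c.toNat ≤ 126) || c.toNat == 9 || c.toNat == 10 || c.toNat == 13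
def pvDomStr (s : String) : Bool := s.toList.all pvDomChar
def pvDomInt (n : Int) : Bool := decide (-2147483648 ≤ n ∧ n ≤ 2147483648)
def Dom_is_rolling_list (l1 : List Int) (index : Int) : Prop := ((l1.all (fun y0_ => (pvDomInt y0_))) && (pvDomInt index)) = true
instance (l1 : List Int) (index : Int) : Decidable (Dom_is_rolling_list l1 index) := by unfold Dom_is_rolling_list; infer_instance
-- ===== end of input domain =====

-- B replaces A's index-by-index self-recursion with one guard and a single
-- `all(...)` over range(index, len(l1)-1); same cost, simpler shape.
-- ===== PORT A =====
-- Python's 'while num >= 10: num //= 10' (leading digit); appears verbatim in A and as _lead in B.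
-- Structural recursion on a fuel counter only so the loop evaluates fast; n.toNat bounds the iterations.
def leadAux : Nat → Int → Int
  | 0, n => n
  | fuel + 1, n => if n ≥ 10 then leadAux fuel (PySem.Int.floordiv n 10) else n

def leadDigit (n : Int) : Int := leadAux n.toNat n

-- A's body, fuel = remaining recursion depth (fuel exhaustion is unreachable from is_rolling_list)
def rollAux : Nat → List Int → Int → Bool
  | 0, _, _ => false
  | fuel + 1, l1, index =>
    if l1.length < 2 then false
    else if index = (l1.length : Int) - 1 then true
    else
      match PySem.List.pyGet? l1 (index + 1) with
      | none => false  -- Python raises IndexError here (outside Pre_)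
      | some n0 =>
        match PySem.List.pyGet? l1 index with
        | none => false  -- Python raises IndexError here (outside Pre_)
        | some cur =>
          if PySem.Int.mod cur 10 ≠ leadDigit n0 then false
          else rollAux fuel l1 (index + 1)

def is_rolling_list (l1 : List Int) (index : Int) : Bool :=
  rollAux (((l1.length : Int) - index).toNat + 1) l1 index

-- ===== PORT B =====
def is_rolling_list_alt (l1 : List Int) (index : Int) : Bool :=
  if l1.length < 2 then false
  else
    (PySem.List.pyRange index ((l1.length : Int) - 1) 1).all fun i =>
      PySem.Int.mod (PySem.List.pyGetD l1 i 0) 10 == leadDigit (PySem.List.pyGetD l1 (i + 1) 0)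
      -- pyGetD is the total form of l1[i]; exact here because Pre_ keeps every i of the range in bounds

-- ===== PRECONDITION & SPEC =====
-- Pre_ excludes exactly the inputs on which Python A raises IndexError: a list with ≥ 2
-- elements together with a start index outside [-len, len-1].
def Pre_is_rolling_list (l1 : List Int) (index : Int) : Prop :=
  l1.length < 2 ∨ (-(l1.length : Int) ≤ index ∧ index ≤ (l1.length : Int) - 1)
instance (l1 : List Int) (index : Int) : Decidable (Pre_is_rolling_list l1 index) := by unfold Pre_is_rolling_list; infer_instance
def pvWitness_is_rolling_list : List Int × Int := ([12, 23], 0)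
def Spec_is_rolling_list (l1 : List Int) (index : Int) (out : Bool) : Prop := out = is_rolling_list_alt l1 index
instance (l1 : List Int) (index : Int) (out : Bool) : Decidable (Spec_is_rolling_list l1 index out) := by unfold Spec_is_rolling_list; infer_instance

-- ===== CLAIM (what is proved, stated in full; the proofs are below) =====
def Claim_equal_is_rolling_list : Prop := ∀ (l1 : List Int) (index : Int), Dom_is_rolling_list l1 index → Pre_is_rolling_list l1 index → Spec_is_rolling_list l1 index (is_rolling_list l1 index)

-- ===== LEMMAS AND PROOFS =====
-- Inside Pre_ (start index in [-len, len-1]), A's recursion from index is B's `all` over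
-- range(index, len-1): peel the range one element per recursive call, by induction on the fuel.
lemma rollAux_eq_all (l1 : List Int) :
    ∀ (fuel : Nat) (index : Int), ¬ l1.length < 2 → -(l1.length : Int) ≤ index → index ≤ (l1.length : Int) - 1 →
    ((l1.length : Int) - 1 - index).toNat < fuel →
    rollAux fuel l1 index =
      (PySem.List.pyRange index ((l1.length : Int) - 1) 1).all (fun i =>
        PySem.Int.mod (PySem.List.pyGetD l1 i 0) 10 == leadDigit (PySem.List.pyGetD l1 (i + 1) 0)) := by
  intro fuel
  induction fuel with
  | zero => intro index _ _ _ hf; omega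
  | succ fuel ih =>
    intro index hlen hlo hhi hf
    by_cases hidx : index = (l1.length : Int) - 1
    · rw [rollAux]
      simp [hlen, hidx, PySem.List.pyRange_one_eq_nil (by omega : (l1.length : Int) - 1 ≤ (l1.length : Int) - 1)]
    · have hlt : index < (l1.length : Int) - 1 := by omega
      have hr1 : PySem.Raise.InRange l1.length (index + 1) := by
        simp [PySem.Raise.InRange]; omega
      have hr0 : PySem.Raise.InRange l1.length index := by
        simp [PySem.Raise.InRange]; omega
      obtain ⟨v, hv⟩ : ∃ v, PySem.List.pyGet? l1 (index + 1) = some v := by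
        cases h : PySem.List.pyGet? l1 (index + 1) with
        | none => rw [PySem.List.pyGet?_eq_none_iff] at h; exact absurd hr1 h
        | some v => exact ⟨v, rfl⟩
      obtain ⟨c, hc⟩ : ∃ c, PySem.List.pyGet? l1 index = some c := by
        cases h : PySem.List.pyGet? l1 index with
        | none => rw [PySem.List.pyGet?_eq_none_iff] at h; exact absurd hr0 h
        | some c => exact ⟨c, rfl⟩
      have hdv : PySem.List.pyGetD l1 (index + 1) 0 = v := by
        simp [PySem.List.pyGetD, hv]
      have hdc : PySem.List.pyGetD l1 index 0 = c := by
        simp [PySem.List.pyGetD, hc]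
      rw [rollAux]
      rw [if_neg hlen, if_neg hidx, hv, hc]
      rw [PySem.List.pyRange_one_cons hlt, List.all_cons]
      simp only [hdv, hdc]
      rw [ih (index + 1) hlen (by omega) (by omega) (by omega)]
      by_cases hm : PySem.Int.mod c 10 = leadDigit v <;> simp [PySem.Int.mod] at hm ⊢ <;> simp [hm]

-- ===== VERDICT (by name: the statement is the Claim_ definition above) =====
theorem is_rolling_list_spec : Claim_equal_is_rolling_list := by
  intro l1 index _ hpre
  unfold Spec_is_rolling_list is_rolling_list_alt is_rolling_list
  by_cases h : l1.length < 2
  · rw [rollAux]; simp [h]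
  · rcases hpre with h' | ⟨hlo, hhi⟩
    · omega
    · rw [if_neg h, rollAux_eq_all l1 _ index h hlo hhi (by omega)]
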